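-- pv_equiv track=rewrite | github.com/GnomDanon/logical-tasks-ml | splitting/intervals.py | createIntervalsTopics
-- ===== SOURCE A (Python) =====
-- def createIntervalsTopics(topicsIdxs,lenTxt):
--   res = []
--   for i in topicsIdxs:
--     res.append(i[1])
--   res.append(lenTxt)
--   if len(res) > 1:
--     return [(res[i],res[i+1]) for i in range(len(res)-1)]
--   return [(0,lenTxt)]
-- ===== SOURCE B (Python) =====
-- def createIntervalsTopics(topicsIdxs, lenTxt):
--     out = []
--     prev = None
--     for topic in topicsIdxs:
--         if prev is not None:
--             out.append((prev, topic[1]))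
--         prev = topic[1]
--     if prev is None:
--         return [(0, lenTxt)]
--     out.append((prev, lenTxt))
--     return out
-- ===== Notes on version B (the rewrite author's own statement) =====
-- stated objective: simpler
-- what changed: B emits each consecutive pair during one traversal with a prev sentinel instead of building the full ends list and then indexing adjacent positions with a range comprehension.
import Mathlib
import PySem

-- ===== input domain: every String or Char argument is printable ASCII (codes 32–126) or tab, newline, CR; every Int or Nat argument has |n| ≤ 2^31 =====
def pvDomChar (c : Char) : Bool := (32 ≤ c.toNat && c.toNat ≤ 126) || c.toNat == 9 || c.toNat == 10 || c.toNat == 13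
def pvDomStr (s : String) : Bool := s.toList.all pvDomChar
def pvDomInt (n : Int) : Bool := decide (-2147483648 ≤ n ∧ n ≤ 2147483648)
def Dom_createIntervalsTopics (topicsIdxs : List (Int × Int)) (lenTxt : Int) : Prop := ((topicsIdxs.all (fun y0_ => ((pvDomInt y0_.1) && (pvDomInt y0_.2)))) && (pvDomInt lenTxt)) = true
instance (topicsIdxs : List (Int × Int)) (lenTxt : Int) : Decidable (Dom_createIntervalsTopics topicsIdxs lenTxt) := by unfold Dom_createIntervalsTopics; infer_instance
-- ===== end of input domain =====

-- B replaces A's two phases (build the ends list, then pair adjacent indices with a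
-- range comprehension) by a single traversal with a `prev` sentinel; objective: simpler.

-- ===== PORT A =====
-- literal port of A: collect ends, append lenTxt, then pair consecutive indices.
-- indices res[i], res[i+1] are always in range inside the comprehension, so pyGetD is exact.
def createIntervalsTopics (topicsIdxs : List (Int × Int)) (lenTxt : Int) : List (Int × Int) :=
  let res : List Int := topicsIdxs.foldl (fun acc i => acc ++ [i.2]) []
  let res := res ++ [lenTxt]
  if res.length > 1 then
    (PySem.List.pyRange 0 ((res.length : Int) - 1) 1).map
      (fun i => (PySem.List.pyGetD res i 0, PySem.List.pyGetD res (i + 1) 0))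
  else [(0, lenTxt)]

-- ===== PORT B =====
-- the loop of Source B: `prev` is the Option-valued sentinel, pairs are emitted on the fly.
def cITgo (prev : Option Int) (ts : List (Int × Int)) (lenTxt : Int) : List (Int × Int) :=
  match ts with
  | [] =>
    match prev with
    | none => [(0, lenTxt)]
    | some p => [(p, lenTxt)]
  | t :: rest =>
    match prev with
    | none => cITgo (some t.2) rest lenTxt
    | some p => (p, t.2) :: cITgo (some t.2) rest lenTxt

def createIntervalsTopics_alt (topicsIdxs : List (Int × Int)) (lenTxt : Int) : List (Int × Int) :=
  cITgo none topicsIdxs lenTxt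

-- ===== PRECONDITION & SPEC =====
def Spec_createIntervalsTopics (topicsIdxs : List (Int × Int)) (lenTxt : Int) (out : List (Int × Int)) : Prop := out = createIntervalsTopics_alt topicsIdxs lenTxt
instance (topicsIdxs : List (Int × Int)) (lenTxt : Int) (out : List (Int × Int)) : Decidable (Spec_createIntervalsTopics topicsIdxs lenTxt out) := by unfold Spec_createIntervalsTopics; infer_instance

-- ===== CLAIM (what is proved, stated in full; the proofs are below) =====
def Claim_equal_createIntervalsTopics : Prop := ∀ (topicsIdxs : List (Int × Int)) (lenTxt : Int), Dom_createIntervalsTopics topicsIdxs lenTxt → Spec_createIntervalsTopics topicsIdxs lenTxt (createIntervalsTopics topicsIdxs lenTxt)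

-- ===== LEMMAS AND PROOFS =====

theorem cIT_foldl_append (ts : List (Int × Int)) (acc : List Int) :
    ts.foldl (fun acc i => acc ++ [i.2]) acc = acc ++ ts.map (·.2) := by
  induction ts generalizing acc with
  | nil => simp
  | cons t rest ih => simp [List.foldl, ih]

-- the range comprehension over Nat indices is exactly "zip with the tail"
theorem cIT_adjNat (l : List Int) :
    (List.range (l.length - 1)).map (fun k => (l.getD k 0, l.getD (k + 1) 0)) = l.zip l.tail := by
  induction l with
  | nil => simp
  | cons a l ih =>
    cases l with
    | nil => simp
    | cons b rest =>
      have h : (b :: rest).length - 1 + 1 = (a :: b :: rest).length - 1 := by simp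
      rw [← h, List.range_succ_eq_map]
      simp only [List.map_cons, List.map_map, List.tail_cons, List.zip_cons_cons]
      refine congrArg₂ List.cons (by simp) ?_
      rw [show (b :: rest).zip rest = (b :: rest).zip (b :: rest).tail from rfl, ← ih]
      exact List.map_congr_left (fun k _ => by simp [Function.comp])

-- the same comprehension, in A's pyRange/pyGetD form
theorem cIT_pyAdj (l : List Int) :
    (PySem.List.pyRange 0 ((l.length : Int) - 1) 1).map
      (fun i => (PySem.List.pyGetD l i 0, PySem.List.pyGetD l (i + 1) 0)) = l.zip l.tail := by
  rw [PySem.List.pyRange_one, List.map_map]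
  have htn : (((l.length : Int) - 1) - 0).toNat = l.length - 1 := by omega
  rw [htn, ← cIT_adjNat l]
  refine List.map_congr_left (fun k _ => ?_)
  have hc : ((k : Int)) + 1 = ((k + 1 : Nat) : Int) := by push_cast; ring
  simp only [Function.comp, zero_add]
  rw [hc]
  simp only [PySem.List.pyGetD_natCast]

theorem cIT_go_zip (rest : List (Int × Int)) (p lenTxt : Int) :
    cITgo (some p) rest lenTxt = (p :: rest.map (·.2)).zip (rest.map (·.2) ++ [lenTxt]) := by
  induction rest generalizing p with
  | nil => simp [cITgo]
  | cons t r ih => simp [cITgo, ih]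

-- zip ignores the trailing element of the longer first list
theorem cIT_zip_drop (xs : List Int) (x y : Int) :
    (x :: (xs ++ [y])).zip (xs ++ [y]) = (x :: xs).zip (xs ++ [y]) := by
  induction xs generalizing x with
  | nil => simp
  | cons a xs ih => simpa using ih a

-- ===== VERDICT (by name: the statement is the Claim_ definition above) =====
theorem createIntervalsTopics_spec : Claim_equal_createIntervalsTopics := by
  intro ts lenTxt _
  unfold Spec_createIntervalsTopics createIntervalsTopics createIntervalsTopics_alt
  cases ts with
  | nil => simp [cITgo]
  | cons t rest =>
    simp only [cIT_foldl_append, List.nil_append]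
    rw [if_pos (by simp), cIT_pyAdj]
    simp only [List.map_cons, List.cons_append, List.tail_cons]
    rw [cIT_zip_drop,
      show cITgo none (t :: rest) lenTxt = cITgo (some t.2) rest lenTxt from rfl,
      cIT_go_zip]
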